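-- pv_equiv track=rewrite | github.com/choo0618/TIL | algoritm/19하반기 코딩테스트/딜리버리히어로코리아/3.py | solution
-- ===== SOURCE A (Python) =====
-- def solution(A):
--     Map = [0]*len(A)
--     for idx,a in enumerate(A):
--         for n in A:
--             if a == n:continue
--             elif a+n == 7:
--                 Map[idx] += 2
--             else:
--                 Map[idx] += 1
--     return min(Map)
--     # Result = 987654321
--     # for idx, n in enumerate(A):
--     #     M = [0]* len(A)
--     #     for check_idx,s in enumerate(A):
--     #         if idx == check_idx or n ==s:continue
--     #         if n + s == 7:
--     #             M[check_idx]+=2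
--     #         else:
--     #             M[check_idx]=1
--     #     result = sum(M)
--     #     if result < Result:
--     #         Result = result
--     return Result
-- ===== SOURCE B (Python) =====
-- def solution(A):
--     cnt = {}
--     for a in A:
--         cnt[a] = cnt.get(a, 0) + 1
--     n = len(A)
--     return min(n - cnt[a] + cnt.get(7 - a, 0) for a in A)
-- ===== Notes on version B (the rewrite author's own statement) =====
-- stated objective: faster
-- what changed: Replaced the O(n^2) nested scan by a single-pass frequency dictionary, computing each element's score as n - cnt[a] + cnt.get(7-a, 0) and taking the min, which is O(n).
-- outside the precondition, e.g. on solution([]): A raises ValueError, B raises ValueError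
import Mathlib
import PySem

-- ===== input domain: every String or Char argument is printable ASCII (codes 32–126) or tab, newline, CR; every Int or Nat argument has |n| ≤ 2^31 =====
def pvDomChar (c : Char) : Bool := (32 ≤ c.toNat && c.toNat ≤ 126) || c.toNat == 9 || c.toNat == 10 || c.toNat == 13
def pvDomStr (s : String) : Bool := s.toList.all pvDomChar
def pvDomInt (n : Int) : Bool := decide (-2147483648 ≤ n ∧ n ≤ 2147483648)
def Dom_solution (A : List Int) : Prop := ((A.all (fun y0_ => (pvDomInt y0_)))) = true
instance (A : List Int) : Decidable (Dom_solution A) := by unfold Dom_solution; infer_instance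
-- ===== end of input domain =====

-- B replaces A's O(n^2) nested scan by a one-pass frequency dictionary (objective: faster, asymptotic).

-- ===== PORT A =====
-- literal transliteration: Map = [0]*len(A); nested loops mutate Map[idx]; return min(Map)
-- (min on the empty list raises ValueError in Python: Pre_solution excludes A = [])
def solution (A : List Int) : Int :=
  let Map : List Int := List.replicate A.length 0
  let Map : List Int :=
    (PySem.List.enumerate A).foldl (fun M p =>
      A.foldl (fun M n =>
        if p.2 == n then M
        else if p.2 + n == 7 then M.set p.1.toNat (M.getD p.1.toNat 0 + 2)
        else M.set p.1.toNat (M.getD p.1.toNat 0 + 1)) M) Map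
  (PySem.List.min? Map (fun x => x)).getD 0

-- ===== PORT B =====
def solution_alt (A : List Int) : Int :=
  let cnt : PySem.Dict Int Int := A.foldl (fun d a => d.insert a (d.getD a 0 + 1)) PySem.Dict.empty
  let n : Int := A.length
  (PySem.List.min? (A.map (fun a => n - cnt.getD a 0 + cnt.getD (7 - a) 0)) (fun x => x)).getD 0

-- ===== PRECONDITION & SPEC =====
-- Pre_ excludes the empty list, on which A's min([]) raises ValueError.
def Pre_solution (A : List Int) : Prop := A ≠ []
instance (A : List Int) : Decidable (Pre_solution A) := by unfold Pre_solution; infer_instance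
def pvWitness_solution : List Int := [1, 6, 3]
def Spec_solution (A : List Int) (out : Int) : Prop := out = solution_alt A
instance (A : List Int) (out : Int) : Decidable (Spec_solution A out) := by unfold Spec_solution; infer_instance

-- ===== CLAIM (what is proved, stated in full; the proofs are below) =====
def Claim_equal_solution : Prop := ∀ (A : List Int), Dom_solution A → Pre_solution A → Spec_solution A (solution A)

-- ===== LEMMAS AND PROOFS =====

-- per-element score of A's inner loop, as a closed form
def pvScore (A : List Int) (a : Int) : Int :=
  (A.length : Int) - A.count a + A.count (7 - a)

theorem pvScore_cons (a n : Int) (t : List Int) :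
    pvScore (n :: t) a
      = (if a == n then 0 else if a + n == 7 then 2 else 1) + pvScore t a := by
  have hne : ¬ ((a == 7 - a) = true) := by simp; omega
  by_cases h1 : (a == n) = true
  · have h1' : a = n := by simpa using h1
    subst h1'
    simp only [pvScore, List.count_cons, List.length_cons, if_pos h1]
    simp [hne]
  · rw [if_neg h1]
    have h1' : ¬ (n == a) = true := by simp at h1 ⊢; omega
    by_cases h2 : (a + n == 7) = true
    · have h2' : (n == 7 - a) = true := by simp at h2 ⊢; omega
      simp only [pvScore, List.count_cons, List.length_cons, if_pos h2, h1', h2']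
      simp
      omega
    · have h2' : ¬ (n == 7 - a) = true := by simp at h2 ⊢; omega
      simp only [pvScore, List.count_cons, List.length_cons, if_neg h2, h1', h2']
      simp
      omega

-- A's inner loop sets index i of M (i in range) to its old value plus pvScore A a
theorem pv_inner (a : Int) (A : List Int) (M : List Int) (i : Nat) (hi : i < M.length) :
    A.foldl (fun M n =>
        if a == n then M
        else if a + n == 7 then M.set i (M.getD i 0 + 2)
        else M.set i (M.getD i 0 + 1)) M
      = M.set i (M.getD i 0 + pvScore A a) := by
  induction A generalizing M with
  | nil =>
    simp [pvScore, List.getD_eq_getElem?_getD, List.getElem?_eq_getElem hi,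
      List.set_getElem_self]
  | cons n t ih =>
    rw [List.foldl_cons]
    by_cases h1 : (a == n) = true
    · rw [if_pos h1, ih M hi, pvScore_cons, if_pos h1]
      congr 1
      ring
    · rw [if_neg h1]
      by_cases h2 : (a + n == 7) = true
      · rw [if_pos h2, ih _ (by simp [hi]), List.set_set, pvScore_cons, if_neg h1, if_pos h2]
        congr 1
        have hd : (M.set i (M.getD i 0 + 2)).getD i 0 = M.getD i 0 + 2 := by
          simp [List.getD_eq_getElem?_getD, List.getElem?_set_self hi]
        rw [hd]
        ring
      · rw [if_neg h2, ih _ (by simp [hi]), List.set_set, pvScore_cons, if_neg h1, if_neg h2]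
        congr 1
        have hd : (M.set i (M.getD i 0 + 1)).getD i 0 = M.getD i 0 + 1 := by
          simp [List.getD_eq_getElem?_getD, List.getElem?_set_self hi]
        rw [hd]
        ring

-- the outer loop turns pre ++ zeros into pre ++ rest.map (pvScore A)
theorem pv_outer (A : List Int) (rest : List Int) (pre : List Int) :
    (PySem.List.enumerate rest (pre.length : Int)).foldl (fun M p =>
        A.foldl (fun M n =>
          if p.2 == n then M
          else if p.2 + n == 7 then M.set p.1.toNat (M.getD p.1.toNat 0 + 2)
          else M.set p.1.toNat (M.getD p.1.toNat 0 + 1)) M)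
      (pre ++ List.replicate rest.length 0)
    = pre ++ rest.map (pvScore A) := by
  induction rest generalizing pre with
  | nil => simp [PySem.List.enumerate_nil]
  | cons a t ih =>
    rw [PySem.List.enumerate_cons, List.foldl_cons]
    have hi : pre.length < (pre ++ List.replicate (a :: t).length 0).length := by
      simp
    rw [pv_inner a A _ ((pre.length : Int)).toNat (by simp)]
    have h0 : (pre ++ List.replicate (a :: t).length 0).getD ((pre.length : Int)).toNat 0 = 0 := by
      simp [List.getD_eq_getElem?_getD]
    have hset : (pre ++ List.replicate (a :: t).length 0).set ((pre.length : Int)).toNat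
        ((pre ++ List.replicate (a :: t).length 0).getD ((pre.length : Int)).toNat 0 + pvScore A a)
        = (pre ++ [pvScore A a]) ++ List.replicate t.length 0 := by
      rw [h0]
      simp [List.replicate_succ, List.set_append_right _ _ (le_refl pre.length)]
    rw [hset]
    have harg : ((pre.length : Int) + 1) = (((pre ++ [pvScore A a]).length : Int)) := by simp
    rw [harg, ih (pre ++ [pvScore A a])]
    simp

-- counter values: B's dict lookup is a count
theorem pv_cnt (A : List Int) (v : Int) :
    ((A.foldl (fun d a => d.insert a (d.getD a 0 + 1)) PySem.Dict.empty : PySem.Dict Int Int)).getD v 0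
      = (A.count v : Int) := by
  simpa using PySem.Dict.getD_foldl_insert_add_one (l := A) (d := (PySem.Dict.empty : PySem.Dict Int Int)) (v := v)

theorem pv_map_eq (A : List Int) :
    A.map (pvScore A)
      = A.map (fun a => (A.length : Int)
          - (A.foldl (fun d a => d.insert a (d.getD a 0 + 1)) PySem.Dict.empty).getD a 0
          + (A.foldl (fun d a => d.insert a (d.getD a 0 + 1)) PySem.Dict.empty).getD (7 - a) 0) := by
  apply List.map_congr_left
  intro a _
  rw [pv_cnt, pv_cnt]
  simp [pvScore]

-- ===== VERDICT (by name: the statement is the Claim_ definition above) =====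
theorem solution_spec : Claim_equal_solution := by
  intro A _ _
  show solution A = solution_alt A
  unfold solution solution_alt
  dsimp only
  have h := pv_outer A A ([] : List Int)
  simp only [List.length_nil, Int.natCast_zero, List.nil_append] at h
  rw [h, pv_map_eq A]
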